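-- pv_equiv track=rewrite | github.com/yoav235/intro2cs | ex12/ex12_utils.py | is_path_legal
-- ===== SOURCE A (Python) =====
-- def is_path_legal(board, path) -> bool:
--     """
--     this is sub function for helping is_valid_path to determine whether the path is legal by the number
--      of steps allowed.
--     :param board: 2D list of all 16 characters of the board.
--     :param path: list of tuples of possible path to a word.
--     :return: True if all the steps in the path are legal, False otherwise.
--     """
--     for index in range(len(path)):
--         if path[index][0] >= len(board) or path[index][0] < 0 or path[index][1] >= len(board[0]) or path[index][1] < 0:
--             return False
--         if index != len(path) - 1:
--             if abs(path[index][0] - path[index+1][0]) >= 2 or abs(path[index][1] - path[index+1][1]) >= 2: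
--                 return False
--     return True
-- ===== SOURCE B (Python) =====
-- def is_path_legal(board, path) -> bool:
--     if not path:
--         return True
--     rows = [r for r, _ in path]
--     cols = [c for _, c in path]
--     in_bounds = (min(rows) >= 0 and max(rows) < len(board)
--                  and min(cols) >= 0 and max(cols) < len(board[0]))
--     if not in_bounds:
--         return False
--     biggest_step = max((max(abs(r1 - r2), abs(c1 - c2))
--                         for (r1, c1), (r2, c2) in zip(path, path[1:])), default=0)
--     return biggest_step < 2
-- ===== Notes on version B (the rewrite author's own statement) =====
-- stated objective: alternative
-- what changed: Instead of testing each cell and pair with boolean scans, B reduces the path to aggregate statistics -- coordinate minima/maxima and the maximum Chebyshev step over consecutive pairs -- and decides legality by five scalar comparisons on those aggregates.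
import Mathlib
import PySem

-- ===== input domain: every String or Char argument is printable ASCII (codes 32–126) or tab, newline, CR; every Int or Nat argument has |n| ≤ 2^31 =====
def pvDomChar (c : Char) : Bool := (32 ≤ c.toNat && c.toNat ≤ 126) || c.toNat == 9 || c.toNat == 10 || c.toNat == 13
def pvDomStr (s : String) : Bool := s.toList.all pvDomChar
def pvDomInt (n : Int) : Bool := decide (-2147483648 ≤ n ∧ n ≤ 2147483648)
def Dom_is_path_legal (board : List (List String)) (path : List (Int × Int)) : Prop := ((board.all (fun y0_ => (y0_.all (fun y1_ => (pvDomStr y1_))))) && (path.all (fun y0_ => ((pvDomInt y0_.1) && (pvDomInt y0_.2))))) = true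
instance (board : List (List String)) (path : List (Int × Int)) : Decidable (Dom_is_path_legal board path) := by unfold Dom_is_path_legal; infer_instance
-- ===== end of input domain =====

-- B replaces A's per-step boolean loop by aggregate statistics of the whole path
-- (coordinate minima/maxima and the maximum Chebyshev step), decided by five scalar
-- comparisons; an alternative of the same cost.

-- ===== PORT A =====
-- A's `for index in range(len(path))` loop with its early `return False`s, as recursion on
-- the index. `len(board[0])` is reached by A only after `path[index][0] >= len(board)` and
-- `path[index][0] < 0` are both false, so board ≠ [] there and the total `board.headD []`
-- is exact (A never raises); `path.getD (i+1)` is reached only with i < len(path) - 1, in range.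
def isPathLegalGoA (board : List (List String)) (path : List (Int × Int)) (i : Nat) : Bool :=
  if h : i < path.length then
    let p := path[i]
    if (board.length : Int) ≤ p.1 || p.1 < 0 ||
       ((board.headD []).length : Int) ≤ p.2 || p.2 < 0 then
      false
    else if i ≠ path.length - 1 then
      let q := path.getD (i + 1) (0, 0)
      if 2 ≤ (p.1 - q.1).natAbs || 2 ≤ (p.2 - q.2).natAbs then
        false
      else
        isPathLegalGoA board path (i + 1)
    else
      isPathLegalGoA board path (i + 1)
  else
    true
termination_by path.length - i

def is_path_legal (board : List (List String)) (path : List (Int × Int)) : Bool :=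
  isPathLegalGoA board path 0

-- ===== PORT B =====
-- `max(abs(r1 - r2), abs(c1 - c2))` — the Chebyshev size of one step
def chebStep (p q : Int × Int) : Nat := Nat.max (p.1 - q.1).natAbs (p.2 - q.2).natAbs

-- Source B: the empty path is legal; otherwise reduce to four coordinate extrema and the
-- largest Chebyshev step. Python's `and` reaches `len(board[0])` only when
-- `max(rows) < len(board)` already holds (so board ≠ []); the total `board.headD []`
-- is exact there, and elsewhere the conjunct is already false either way.
def is_path_legal_alt (board : List (List String)) (path : List (Int × Int)) : Bool :=
  match path with
  | [] => true
  | _ :: _ =>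
    let rows := path.map Prod.fst
    let cols := path.map Prod.snd
    let inBounds :=
      decide (0 ≤ rows.min?.getD 0) && decide (rows.max?.getD 0 < (board.length : Int)) &&
      decide (0 ≤ cols.min?.getD 0) && decide (cols.max?.getD 0 < ((board.headD []).length : Int))
    if !inBounds then false
    else
      let biggest := ((path.zip path.tail).map (fun pq => chebStep pq.1 pq.2)).foldl Nat.max 0
      decide (biggest < 2)

-- ===== PRECONDITION & SPEC =====
def Spec_is_path_legal (board : List (List String)) (path : List (Int × Int)) (out : Bool) : Prop := out = is_path_legal_alt board path
instance (board : List (List String)) (path : List (Int × Int)) (out : Bool) : Decidable (Spec_is_path_legal board path out) := by unfold Spec_is_path_legal; infer_instance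

-- ===== CLAIM (what is proved, stated in full; the proofs are below) =====
def Claim_equal_is_path_legal : Prop := ∀ (board : List (List String)) (path : List (Int × Int)), Dom_is_path_legal board path → Spec_is_path_legal board path (is_path_legal board path)

-- ===== LEMMAS AND PROOFS =====

-- per-cell bounds test of A, used as the common middle form
def inBoundsB (board : List (List String)) (p : Int × Int) : Bool :=
  decide (0 ≤ p.1) && decide (p.1 < (board.length : Int)) &&
  decide (0 ≤ p.2) && decide (p.2 < ((board.headD []).length : Int))

def adjB (p q : Int × Int) : Bool :=
  decide ((p.1 - q.1).natAbs < 2) && decide ((p.2 - q.2).natAbs < 2)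

def pairsB (l : List (Int × Int)) : Bool := (l.zip l.tail).all (fun pq => adjB pq.1 pq.2)

theorem inb_eq (board : List (List String)) (p : Int × Int) :
    (!((decide ((board.length : Int) ≤ p.1)) || decide (p.1 < 0) ||
       decide (((board.headD []).length : Int) ≤ p.2) || decide (p.2 < 0))) = inBoundsB board p := by
  rw [Bool.eq_iff_iff]
  simp only [inBoundsB, Bool.not_eq_eq_eq_not, Bool.not_true, Bool.or_eq_false_iff,
    Bool.and_eq_true, decide_eq_true_eq, decide_eq_false_iff_not]
  omega

theorem adj_eq (p q : Int × Int) :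
    (!(decide (2 ≤ (p.1 - q.1).natAbs) || decide (2 ≤ (p.2 - q.2).natAbs))) = adjB p q := by
  rw [Bool.eq_iff_iff]
  simp only [adjB, Bool.not_eq_eq_eq_not, Bool.not_true, Bool.or_eq_false_iff,
    Bool.and_eq_true, decide_eq_true_eq, decide_eq_false_iff_not]
  omega

theorem pairsB_cons (p q : Int × Int) (l : List (Int × Int)) :
    pairsB (p :: q :: l) = (adjB p q && pairsB (q :: l)) := by
  simp [pairsB]

-- invariant of A's loop: from index i on, it tests bounds of every cell and adjacency of
-- every consecutive pair in the suffix drop i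
theorem goA_eq (board : List (List String)) (path : List (Int × Int)) :
    ∀ (n i : Nat), path.length - i = n →
      isPathLegalGoA board path i
        = ((path.drop i).all (inBoundsB board) && pairsB (path.drop i)) := by
  intro n
  induction n with
  | zero =>
    intro i hn
    have hge : path.length ≤ i := by omega
    have hdrop : path.drop i = [] := List.drop_eq_nil_of_le hge
    rw [isPathLegalGoA, dif_neg (by omega), hdrop]
    simp [pairsB]
  | succ n ih =>
    intro i hn
    have hi : i < path.length := by omega
    have hdrop : path.drop i = path[i] :: path.drop (i + 1) := List.drop_eq_getElem_cons hi
    rw [isPathLegalGoA, dif_pos hi, hdrop]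
    show (if ((board.length : Int) ≤ path[i].1 || path[i].1 < 0 ||
       ((board.headD []).length : Int) ≤ path[i].2 || path[i].2 < 0 : Bool) = true then false
      else if i ≠ path.length - 1 then
        (if (2 ≤ (path[i].1 - (path.getD (i+1) (0,0)).1).natAbs ||
             2 ≤ (path[i].2 - (path.getD (i+1) (0,0)).2).natAbs : Bool) = true then false
         else isPathLegalGoA board path (i + 1))
      else isPathLegalGoA board path (i + 1)) = _
    by_cases hb : ((board.length : Int) ≤ path[i].1 || path[i].1 < 0 ||
       ((board.headD []).length : Int) ≤ path[i].2 || path[i].2 < 0 : Bool) = true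
    · have hinb : inBoundsB board path[i] = false := by
        rw [← inb_eq, hb]; rfl
      rw [if_pos hb, List.all_cons, hinb, Bool.false_and, Bool.false_and]
    · have hb' : ((board.length : Int) ≤ path[i].1 || path[i].1 < 0 ||
         ((board.headD []).length : Int) ≤ path[i].2 || path[i].2 < 0 : Bool) = false :=
        Bool.not_eq_true _ ▸ hb
      have hinb : inBoundsB board path[i] = true := by rw [← inb_eq, hb']; rfl
      rw [if_neg hb]
      by_cases hlast : i = path.length - 1
      · have hnil : path.drop (i + 1) = [] := List.drop_eq_nil_of_le (by omega)
        rw [if_neg (by simp [hlast]), ih (i + 1) (by omega), hnil]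
        simp [List.all_cons, hinb, pairsB]
      · have hi1 : i + 1 < path.length := by omega
        have hdrop1 : path.drop (i + 1) = path[i + 1] :: path.drop (i + 2) :=
          List.drop_eq_getElem_cons hi1
        have hgetD : path.getD (i + 1) (0, 0) = path[i + 1] := List.getD_eq_getElem _ _ hi1
        rw [if_pos hlast, hgetD]
        by_cases ha : (decide (2 ≤ (path[i].1 - path[i+1].1).natAbs) ||
            decide (2 ≤ (path[i].2 - path[i+1].2).natAbs)) = true
        · have hadj : adjB path[i] path[i+1] = false := by rw [← adj_eq, ha]; rfl
          rw [if_pos ha, hdrop1, pairsB_cons]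
          simp [hadj]
        · have ha' : (decide (2 ≤ (path[i].1 - path[i+1].1).natAbs) ||
              decide (2 ≤ (path[i].2 - path[i+1].2).natAbs)) = false := Bool.not_eq_true _ ▸ ha
          have hadj : adjB path[i] path[i+1] = true := by rw [← adj_eq, ha']; rfl
          rw [if_neg ha, ih (i + 1) (by omega), hdrop1, pairsB_cons, ← hdrop1,
            List.all_cons, hinb, hadj, Bool.true_and, Bool.true_and]

-- min/max extrema characterise a uniform interval bound over a nonempty list
theorem minmax_bounds (l : List Int) (hl : l ≠ []) (n : Int) :
    ((0 ≤ l.min?.getD 0) ∧ (l.max?.getD 0 < n)) ↔ ∀ x ∈ l, 0 ≤ x ∧ x < n := by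
  obtain ⟨m, hm⟩ := Option.isSome_iff_exists.mp (List.isSome_min?_of_ne_nil hl)
  obtain ⟨M, hM⟩ := Option.isSome_iff_exists.mp (List.isSome_max?_of_ne_nil hl)
  obtain ⟨hmm, hml⟩ := List.min?_eq_some_iff.mp hm
  obtain ⟨hMm, hMl⟩ := List.max?_eq_some_iff.mp hM
  rw [hm, hM]
  constructor
  · rintro ⟨h0, hn⟩ x hx
    exact ⟨le_trans h0 (hml x hx), lt_of_le_of_lt (hMl x hx) hn⟩
  · intro h
    exact ⟨(h m hmm).1, (h M hMm).2⟩

theorem foldl_max_lt (l : List Nat) : ∀ a : Nat,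
    ((l.foldl Nat.max a < 2) ↔ (a < 2 ∧ ∀ x ∈ l, x < 2)) := by
  induction l with
  | nil => intro a; simp
  | cons x xs ih =>
    intro a
    simp only [List.foldl_cons, ih, Nat.max_lt, List.mem_cons]
    constructor
    · rintro ⟨⟨ha, hx⟩, h⟩
      exact ⟨ha, fun y hy => hy.elim (fun e => e ▸ hx) (h y)⟩
    · rintro ⟨ha, h⟩
      exact ⟨⟨ha, h x (Or.inl rfl)⟩, fun y hy => h y (Or.inr hy)⟩

theorem adjB_cheb (p q : Int × Int) : adjB p q = decide (chebStep p q < 2) := by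
  rw [Bool.eq_iff_iff]
  simp only [adjB, chebStep, Bool.and_eq_true, decide_eq_true_eq, Nat.max_lt]

-- B equals the middle form (all cells in bounds && all consecutive pairs adjacent)
theorem alt_eq (board : List (List String)) (path : List (Int × Int)) :
    is_path_legal_alt board path = (path.all (inBoundsB board) && pairsB path) := by
  match path with
  | [] => simp [is_path_legal_alt, pairsB]
  | p :: rest =>
    rw [is_path_legal_alt]
    have hne : (p :: rest) ≠ ([] : List (Int × Int)) := by simp
    have hrne : ((p :: rest).map Prod.fst) ≠ [] := by simp
    have hcne : ((p :: rest).map Prod.snd) ≠ [] := by simp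
    by_cases hb : (p :: rest).all (inBoundsB board) = true
    · have hball : ∀ x ∈ (p :: rest), inBoundsB board x = true := List.all_eq_true.mp hb
      have hr : ∀ x ∈ (p :: rest).map Prod.fst, 0 ≤ x ∧ x < (board.length : Int) := by
        intro x hx
        obtain ⟨q, hq, rfl⟩ := List.mem_map.mp hx
        have := hball q hq
        simp only [inBoundsB, Bool.and_eq_true, decide_eq_true_eq] at this
        exact ⟨this.1.1.1, this.1.1.2⟩
      have hc : ∀ x ∈ (p :: rest).map Prod.snd, 0 ≤ x ∧ x < (((board.headD []).length) : Int) := by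
        intro x hx
        obtain ⟨q, hq, rfl⟩ := List.mem_map.mp hx
        have := hball q hq
        simp only [inBoundsB, Bool.and_eq_true, decide_eq_true_eq] at this
        exact ⟨this.1.2, this.2⟩
      have h1 := (minmax_bounds _ hrne (board.length : Int)).mpr hr
      have h2 := (minmax_bounds _ hcne (((board.headD []).length) : Int)).mpr hc
      have hib : (decide (0 ≤ ((p :: rest).map Prod.fst).min?.getD 0) &&
          decide (((p :: rest).map Prod.fst).max?.getD 0 < (board.length : Int)) &&
          decide (0 ≤ ((p :: rest).map Prod.snd).min?.getD 0) &&
          decide (((p :: rest).map Prod.snd).max?.getD 0 < (((board.headD []).length) : Int))) = true := by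
        simp only [Bool.and_eq_true, decide_eq_true_eq]
        exact ⟨⟨⟨h1.1, h1.2⟩, h2.1⟩, h2.2⟩
      rw [hib]
      simp only [Bool.not_true, Bool.false_eq_true, if_false, hb, Bool.true_and]
      rw [Bool.eq_iff_iff, decide_eq_true_eq, foldl_max_lt]
      simp only [Nat.zero_lt_succ, true_and, pairsB, List.all_eq_true, List.mem_map]
      constructor
      · intro h pq hpq
        rw [adjB_cheb, decide_eq_true_eq]
        exact h _ ⟨pq, hpq, rfl⟩
      · rintro h x ⟨pq, hpq, rfl⟩
        have := h pq hpq
        rw [adjB_cheb, decide_eq_true_eq] at this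
        exact this
    · -- some cell is out of bounds: one of the four extrema comparisons fails too
      have hb' : (p :: rest).all (inBoundsB board) = false := by
        cases h : (p :: rest).all (inBoundsB board) with
        | false => rfl
        | true => exact absurd h hb
      rw [hb', Bool.false_and]
      have : ¬ ((0 ≤ ((p :: rest).map Prod.fst).min?.getD 0 ∧
            ((p :: rest).map Prod.fst).max?.getD 0 < (board.length : Int)) ∧
          (0 ≤ ((p :: rest).map Prod.snd).min?.getD 0 ∧
            ((p :: rest).map Prod.snd).max?.getD 0 < (((board.headD []).length) : Int))) := by
        rintro ⟨h1, h2⟩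
        apply hb
        rw [List.all_eq_true]
        intro q hq
        have hr := (minmax_bounds _ hrne _).mp h1 q.1 (List.mem_map.mpr ⟨q, hq, rfl⟩)
        have hc := (minmax_bounds _ hcne _).mp h2 q.2 (List.mem_map.mpr ⟨q, hq, rfl⟩)
        simp only [inBoundsB, Bool.and_eq_true, decide_eq_true_eq]
        exact ⟨⟨⟨hr.1, hr.2⟩, hc.1⟩, hc.2⟩
      have hib : (decide (0 ≤ ((p :: rest).map Prod.fst).min?.getD 0) &&
          decide (((p :: rest).map Prod.fst).max?.getD 0 < (board.length : Int)) &&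
          decide (0 ≤ ((p :: rest).map Prod.snd).min?.getD 0) &&
          decide (((p :: rest).map Prod.snd).max?.getD 0 < (((board.headD []).length) : Int))) = false := by
        rw [Bool.eq_false_iff]
        intro hcontra
        simp only [Bool.and_eq_true, decide_eq_true_eq] at hcontra
        exact this ⟨⟨hcontra.1.1.1, hcontra.1.1.2⟩, ⟨hcontra.1.2, hcontra.2⟩⟩
      rw [hib]
      rfl

-- ===== VERDICT (by name: the statement is the Claim_ definition above) =====
theorem is_path_legal_spec : Claim_equal_is_path_legal := by
  intro board path _
  unfold Spec_is_path_legal is_path_legal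
  rw [goA_eq board path (path.length - 0) 0 rfl, alt_eq]
  rfl
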